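-- pv_equiv track=rewrite | github.com/2630682353/majiang | 20250219.py | cal_dui
-- ===== SOURCE A (Python) =====
-- def cal_dui(list_x, list_y):
-- 	num_dui = 0;i=0
-- 	while i<len(list_x) -1:
-- 		if list_x[i] == list_x[i+1]:
-- 			num_dui = num_dui + 1
-- 			i = i + 1
-- 		i = i + 1
-- 	i=0
-- 	while i<len(list_y) -1:
-- 		if list_y[i] == list_y[i+1]:
-- 			num_dui = num_dui + 1
-- 			i = i + 1
-- 		i = i + 1
-- 	return num_dui
-- ===== SOURCE B (Python) =====
-- def _run_lengths(lst):
--     runs = []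
--     i = 0
--     m = len(lst)
--     while i < m:
--         head = lst[i]
--         i += 1
--         n = 1
--         while i < m and lst[i] == head:
--             n += 1
--             i += 1
--         runs.append(n)
--     return runs
--
--
-- def cal_dui(list_x, list_y):
--     return sum(n // 2 for n in _run_lengths(list_x)) + \
--            sum(n // 2 for n in _run_lengths(list_y))
-- ===== Notes on version B (the rewrite author's own statement) =====
-- stated objective: alternative
-- what changed: B splits each list into maximal runs of consecutive equal elements and sums floor(length/2) per run, instead of A's greedy index-jumping scan over adjacent pairs.
import Mathlib
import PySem

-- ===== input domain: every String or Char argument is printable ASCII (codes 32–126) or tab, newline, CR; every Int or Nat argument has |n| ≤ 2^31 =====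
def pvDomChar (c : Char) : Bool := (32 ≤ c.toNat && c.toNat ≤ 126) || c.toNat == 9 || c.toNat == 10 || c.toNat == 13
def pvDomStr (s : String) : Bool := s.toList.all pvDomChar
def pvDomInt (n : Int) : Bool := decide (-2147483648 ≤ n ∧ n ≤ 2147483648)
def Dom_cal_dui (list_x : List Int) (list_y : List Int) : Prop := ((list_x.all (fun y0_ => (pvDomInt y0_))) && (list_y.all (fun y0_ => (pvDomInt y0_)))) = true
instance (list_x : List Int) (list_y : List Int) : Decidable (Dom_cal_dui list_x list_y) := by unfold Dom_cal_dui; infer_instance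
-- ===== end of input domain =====

-- B counts floor(L/2) per maximal run of equal elements instead of A's greedy adjacent-pair scan; same cost, alternative algorithm.

-- ===== PORT A =====
-- A's while loop: compare positions i, i+1; on a match count and skip both, else advance one.
-- Ported as structural recursion on the list (i advancing by one = dropping the head).
def pvScanA : List Int → Int
  | a :: b :: rest => if a == b then 1 + pvScanA rest else pvScanA (b :: rest)
  | _ => 0

def cal_dui (list_x : List Int) (list_y : List Int) : Int :=
  pvScanA list_x + pvScanA list_y

-- ===== PORT B =====
-- Source B's inner while: consume the elements equal to head, returning (extra count, remainder).
def pvTakeRun (a : Int) : List Int → Nat × List Int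
  | [] => (0, [])
  | b :: t => if b == a then ((pvTakeRun a t).1 + 1, (pvTakeRun a t).2) else (0, b :: t)

theorem pvTakeRun_len (a : Int) : ∀ (t : List Int), (pvTakeRun a t).2.length ≤ t.length
  | [] => Nat.le_refl _
  | b :: t => by
    simp only [pvTakeRun]
    split
    · exact Nat.le_succ_of_le (pvTakeRun_len a t)
    · exact Nat.le_refl _

-- Source B's outer while: the list of maximal-run lengths.
def pvRunLengths : List Int → List Nat
  | [] => []
  | a :: t => (1 + (pvTakeRun a t).1) :: pvRunLengths (pvTakeRun a t).2
termination_by l => l.length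
decreasing_by exact Nat.lt_succ_of_le (pvTakeRun_len a t)

def cal_dui_alt (list_x : List Int) (list_y : List Int) : Int :=
  ((pvRunLengths list_x).map (fun n => ((n / 2 : Nat) : Int))).sum +
  ((pvRunLengths list_y).map (fun n => ((n / 2 : Nat) : Int))).sum

-- ===== PRECONDITION & SPEC =====
def Spec_cal_dui (list_x : List Int) (list_y : List Int) (out : Int) : Prop := out = cal_dui_alt list_x list_y
instance (list_x : List Int) (list_y : List Int) (out : Int) : Decidable (Spec_cal_dui list_x list_y out) := by unfold Spec_cal_dui; infer_instance

-- ===== CLAIM (what is proved, stated in full; the proofs are below) =====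
def Claim_equal_cal_dui : Prop := ∀ (list_x : List Int) (list_y : List Int), Dom_cal_dui list_x list_y → Spec_cal_dui list_x list_y (cal_dui list_x list_y)

-- ===== LEMMAS AND PROOFS =====

-- pvTakeRun splits its input into a run of copies of a and a remainder not starting with a.
theorem pvTakeRun_spec (a : Int) : ∀ (t : List Int),
    t = List.replicate (pvTakeRun a t).1 a ++ (pvTakeRun a t).2 ∧ (pvTakeRun a t).2.head? ≠ some a
  | [] => by simp [pvTakeRun]
  | b :: t => by
    by_cases hb : b = a
    · obtain ⟨ih1, ih2⟩ := pvTakeRun_spec a t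
      subst hb
      simp only [pvTakeRun, beq_self_eq_true, if_true]
      constructor
      · rw [List.replicate_succ, List.cons_append]
        exact congrArg _ ih1
      · exact ih2
    · simp [pvTakeRun, hb]

-- A's greedy scan counts ⌊n/2⌋ pairs on a run of n equal elements.
theorem pvScanA_replicate : ∀ (n : Nat) (a : Int) (rest : List Int), rest.head? ≠ some a →
    pvScanA (List.replicate n a ++ rest) = ((n / 2 : Nat) : Int) + pvScanA rest
  | 0, a, rest, _ => by simp
  | 1, a, rest, h => by
    cases rest with
    | nil => simp [pvScanA]
    | cons b t =>
      have hb : ¬ (a == b) = true := by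
        simp only [List.head?] at h
        simp only [beq_iff_eq]
        intro he; exact h (by rw [he])
      simp [pvScanA, hb]
  | n + 2, a, rest, h => by
    have ih := pvScanA_replicate n a rest h
    have : List.replicate (n + 2) a ++ rest = a :: a :: (List.replicate n a ++ rest) := by
      simp [List.replicate_succ]
    rw [this]
    simp only [pvScanA, beq_self_eq_true, if_true, ih]
    have : (n + 2) / 2 = n / 2 + 1 := by omega
    rw [this]
    push_cast
    ring

-- A's scan equals B's per-run sum, on one list.
theorem pvScanA_eq_runs : ∀ (xs : List Int),
    pvScanA xs = ((pvRunLengths xs).map (fun n => ((n / 2 : Nat) : Int))).sum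
  | [] => by simp [pvScanA, pvRunLengths]
  | a :: t => by
    obtain ⟨hsplit, hhead⟩ := pvTakeRun_spec a t
    have hlen := pvTakeRun_len a t
    have ih := pvScanA_eq_runs (pvTakeRun a t).2
    have hx : a :: t = List.replicate (1 + (pvTakeRun a t).1) a ++ (pvTakeRun a t).2 := by
      rw [Nat.add_comm 1, List.replicate_succ, List.cons_append]
      exact congrArg _ hsplit
    calc pvScanA (a :: t)
        = (((1 + (pvTakeRun a t).1) / 2 : Nat) : Int) + pvScanA (pvTakeRun a t).2 := by
          rw [hx]; exact pvScanA_replicate _ a _ hhead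
      _ = ((pvRunLengths (a :: t)).map (fun n => ((n / 2 : Nat) : Int))).sum := by
          rw [pvRunLengths, ih]; simp
termination_by xs => xs.length
decreasing_by exact Nat.lt_succ_of_le (pvTakeRun_len a t)

-- ===== VERDICT (by name: the statement is the Claim_ definition above) =====
theorem cal_dui_spec : Claim_equal_cal_dui := by
  intro list_x list_y _
  unfold Spec_cal_dui cal_dui cal_dui_alt
  rw [pvScanA_eq_runs list_x, pvScanA_eq_runs list_y]
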